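-- pv_equiv track=rewrite | github.com/andrisberzins-1/SFEM | generate_homework.py | _get_leader_flags
-- ===== SOURCE A (Python) =====
-- def _get_leader_flags(tiers):
--     """If any label in a cluster has tier > 0, ALL adjacent labels get leaders."""
--     flags = [t > 0 for t in tiers]
--     for i in range(len(tiers)):
--         if tiers[i] == 0:
--             if (i > 0 and tiers[i - 1] > 0) or \
--                (i < len(tiers) - 1 and tiers[i + 1] > 0):
--                 flags[i] = True
--     return flags
-- ===== SOURCE B (Python) =====
-- def _get_leader_flags(tiers):
--     """If any label in a cluster has tier > 0, ALL adjacent labels get leaders."""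
--     res = []
--     prev_pos = False   # was the element before `pending` positive?
--     pending = None     # the one element whose flag is not yet decided
--     for t in tiers:
--         if pending is not None:
--             res.append(pending > 0 or (pending == 0 and (prev_pos or t > 0)))
--             prev_pos = pending > 0
--         pending = t
--     if pending is not None:
--         res.append(pending > 0 or (pending == 0 and prev_pos))
--     return res
-- ===== Notes on version B (the rewrite author's own statement) =====
-- stated objective: alternative
-- what changed: A builds the flag array up front and then runs an index loop over range(len(tiers)) mutating flags[i] after bounds-checked reads of tiers[i-1]/tiers[i+1]; B is a single streaming pass with a one-element lag buffer: each element's flag is emitted when its successor arrives (carrying the predecessor's positivity), with a final flush, so there is no index arithmetic, no pre-built array and no mutation of existing entries.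
import Mathlib
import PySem

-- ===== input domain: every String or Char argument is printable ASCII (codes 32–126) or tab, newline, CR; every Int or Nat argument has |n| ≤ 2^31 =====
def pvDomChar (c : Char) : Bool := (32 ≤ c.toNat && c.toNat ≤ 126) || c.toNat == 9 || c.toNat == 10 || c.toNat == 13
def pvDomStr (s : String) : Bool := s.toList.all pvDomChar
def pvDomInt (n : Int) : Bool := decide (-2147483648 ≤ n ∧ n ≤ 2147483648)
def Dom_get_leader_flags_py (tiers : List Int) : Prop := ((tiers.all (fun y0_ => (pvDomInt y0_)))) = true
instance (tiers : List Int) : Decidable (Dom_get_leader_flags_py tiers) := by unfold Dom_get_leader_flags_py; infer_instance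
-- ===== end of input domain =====

-- B replaces A's index loop (flag array + bounds-checked neighbor indexing, in-place
-- mutation) by one streaming pass with a one-element lag buffer: each flag is emitted
-- when the successor arrives, with a final flush (objective: alternative; same O(n) cost).

-- ===== PORT A =====
-- the loop body of A: for i in range(len(tiers)): if tiers[i]==0: if (i>0 and ...) or (...): flags[i] = True
-- (indices i, i-1, i+1 are read only when the guards put them in range, so pyGetD is exact here)
def stepA (tiers : List Int) (flags : List Bool) (i : Int) : List Bool :=
  if PySem.List.pyGetD tiers i 0 = 0 then
    if (0 < i ∧ 0 < PySem.List.pyGetD tiers (i - 1) 0) ∨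
       (i < (tiers.length : Int) - 1 ∧ 0 < PySem.List.pyGetD tiers (i + 1) 0) then
      flags.set i.toNat true
    else flags
  else flags

def get_leader_flags_py (tiers : List Int) : List Bool :=
  (PySem.List.pyRange 0 tiers.length 1).foldl (stepA tiers)
    (tiers.map (fun t => decide (0 < t)))

-- ===== PORT B =====
-- for t in tiers: if pending is not None: res.append(pending>0 or (pending==0 and (prev_pos or t>0))); prev_pos = pending>0
--   pending = t
-- if pending is not None: res.append(pending>0 or (pending==0 and prev_pos))
def stepB (st : List Bool × Bool × Option Int) (t : Int) : List Bool × Bool × Option Int :=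
  match st with
  | (res, prev_pos, none) => (res, prev_pos, some t)
  | (res, prev_pos, some c) =>
    (res ++ [decide (0 < c) || (decide (c = 0) && (prev_pos || decide (0 < t)))],
     decide (0 < c), some t)

def flushB (st : List Bool × Bool × Option Int) : List Bool :=
  match st with
  | (res, _, none) => res
  | (res, prev_pos, some c) => res ++ [decide (0 < c) || (decide (c = 0) && prev_pos)]

def get_leader_flags_py_alt (tiers : List Int) : List Bool :=
  flushB (tiers.foldl stepB ([], false, none))

-- ===== PRECONDITION & SPEC =====
def Spec_get_leader_flags_py (tiers : List Int) (out : List Bool) : Prop := out = get_leader_flags_py_alt tiers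
instance (tiers : List Int) (out : List Bool) : Decidable (Spec_get_leader_flags_py tiers out) := by unfold Spec_get_leader_flags_py; infer_instance

-- ===== CLAIM (what is proved, stated in full; the proofs are below) =====
def Claim_equal_get_leader_flags_py : Prop := ∀ (tiers : List Int), Dom_get_leader_flags_py tiers → Spec_get_leader_flags_py tiers (get_leader_flags_py tiers)

-- ===== LEMMAS AND PROOFS =====
-- the guard of A's loop, at loop index i, as a Bool
def CndA (tiers : List Int) (i : Int) : Bool :=
  decide (PySem.List.pyGetD tiers i 0 = 0 ∧
    ((0 < i ∧ 0 < PySem.List.pyGetD tiers (i - 1) 0) ∨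
     (i < (tiers.length : Int) - 1 ∧ 0 < PySem.List.pyGetD tiers (i + 1) 0)))

theorem stepA_eq (tiers : List Int) (flags : List Bool) (i : Int) :
    stepA tiers flags i = if CndA tiers i then flags.set i.toNat true else flags := by
  unfold stepA CndA
  by_cases h1 : PySem.List.pyGetD tiers i 0 = 0 <;>
    by_cases h2 : (0 < i ∧ 0 < PySem.List.pyGetD tiers (i - 1) 0) ∨
       (i < (tiers.length : Int) - 1 ∧ 0 < PySem.List.pyGetD tiers (i + 1) 0) <;>
    simp [h1, h2]

theorem loopA (tiers : List Int) (m : Nat) (hm : m ≤ tiers.length)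
    (flags0 : List Bool) (hlen : flags0.length = tiers.length) :
    ((PySem.List.pyRange 0 (m : Int) 1).foldl (stepA tiers) flags0).length = flags0.length ∧
    ∀ j : Nat, ((PySem.List.pyRange 0 (m : Int) 1).foldl (stepA tiers) flags0)[j]? =
      if j < m ∧ CndA tiers (j : Int) = true then some true else flags0[j]? := by
  induction m with
  | zero =>
    simp [PySem.List.pyRange_one_eq_nil (by omega : (0:Int) ≤ 0)]
  | succ m ih =>
    obtain ⟨ihlen, ihget⟩ := ih (by omega)
    have hsp : (PySem.List.pyRange 0 ((m+1 : Nat) : Int) 1) =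
        PySem.List.pyRange 0 (m : Int) 1 ++ [(m : Int)] := by
      push_cast
      exact PySem.List.pyRange_one_succ_right (by omega)
    rw [hsp, List.foldl_append]
    simp only [List.foldl_cons, List.foldl_nil]
    rw [stepA_eq]
    constructor
    · split <;> simp [ihlen]
    · intro j
      have hmt : ((m : Int)).toNat = m := by simp
      have hiff : (j < m + 1 ∧ CndA tiers (j:Int) = true) ↔ (j < m ∧ CndA tiers (j:Int) = true) ∨ (j = m ∧ CndA tiers (j:Int) = true) := by
        constructor
        · rintro ⟨h1, h2⟩
          rcases Nat.lt_succ_iff_lt_or_eq.mp h1 with h | h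
          · exact Or.inl ⟨h, h2⟩
          · exact Or.inr ⟨h, h2⟩
        · rintro (⟨h1, h2⟩ | ⟨h1, h2⟩)
          · exact ⟨by omega, h2⟩
          · exact ⟨by omega, h2⟩
      by_cases hc : CndA tiers (m : Int) = true
      · rw [if_pos hc, hmt, List.getElem?_set]
        by_cases hj : j = m
        · rw [if_pos hj.symm, if_pos (by rw [ihlen]; omega),
            if_pos ⟨by omega, by simpa [hj] using hc⟩]
        · rw [if_neg (fun h => hj h.symm), ihget j]
          have : (j < m + 1 ∧ CndA tiers (j:Int) = true) ↔ (j < m ∧ CndA tiers (j:Int) = true) := by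
            rw [hiff]
            constructor
            · rintro (h | ⟨h1, h2⟩)
              · exact h
              · exact absurd h1 hj
            · exact Or.inl
          exact (if_congr this rfl rfl).symm
      · rw [if_neg hc, ihget j]
        by_cases hj : j = m
        · subst hj
          rw [if_neg (fun h => absurd h.1 (lt_irrefl j)), if_neg (fun h => hc h.2)]
        · have : (j < m + 1 ∧ CndA tiers (j:Int) = true) ↔ (j < m ∧ CndA tiers (j:Int) = true) := by
            rw [hiff]
            constructor
            · rintro (h | ⟨h1, h2⟩)
              · exact h
              · exact absurd h1 hj
            · exact Or.inl
          exact Eq.symm (if_congr this rfl rfl)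

theorem pyGetD_at (tiers : List Int) (j : Nat) (hj : j < tiers.length) :
    PySem.List.pyGetD tiers ((j : Int)) 0 = tiers[j] := by
  have h := PySem.List.pyGetD_eq_getElem tiers (i := (j : Int)) 0 (by omega)
    (by exact_mod_cast hj)
  simpa using h

-- proof-side helper: the flag stream characterized as structural recursion with a carry
def goB (prev : Bool) : List Int → List Bool
  | [] => []
  | t :: rest =>
    let next_pos := match rest with | [] => false | r :: _ => decide (0 < r)
    (decide (0 < t) || (decide (t = 0) && (prev || next_pos))) :: goB (decide (0 < t)) rest

-- B's fold-with-lag equals the carry recursion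
theorem foldB_goB (l : List Int) : ∀ (res : List Bool) (prev : Bool) (c : Int),
    flushB (l.foldl stepB (res, prev, some c)) = res ++ goB prev (c :: l) := by
  induction l with
  | nil =>
    intro res prev c
    cases hc : decide (0 < c) <;> simp [flushB, goB, hc]
  | cons t l ih =>
    intro res prev c
    simp only [List.foldl_cons, stepB]
    rw [ih]
    simp [goB]

theorem altB_goB (tiers : List Int) :
    get_leader_flags_py_alt tiers = goB false tiers := by
  cases tiers with
  | nil => rfl
  | cons c l =>
    unfold get_leader_flags_py_alt
    simp only [List.foldl_cons, stepB]
    rw [foldB_goB]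
    simp

theorem goB_len (l : List Int) : ∀ prev, (goB prev l).length = l.length := by
  induction l with
  | nil => intro prev; rfl
  | cons t rest ih => intro prev; simp [goB, ih]

-- the value of B's recursion at index j, in terms of the list entries
theorem goB_get (l : List Int) : ∀ (prev : Bool) (j : Nat) (hj : j < l.length),
    (goB prev l)[j]? = some (
      decide (0 < l[j]'hj) ||
      (decide (l[j]'hj = 0) &&
        ((if _h0 : j = 0 then prev else decide (0 < l[j-1]'(by omega))) ||
         (if h1 : j + 1 < l.length then decide (0 < l[j+1]'h1) else false)))) := by
  induction l with
  | nil => intro prev j hj; simp at hj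
  | cons t rest ih =>
    intro prev j hj
    cases j with
    | zero =>
      cases rest with
      | nil => rfl
      | cons r rs => rfl
    | succ k =>
      have hk : k < rest.length := by simpa using hj
      simp only [goB, List.getElem?_cons_succ]
      rw [ih (decide (0 < t)) k hk]
      congr 1
      by_cases hk0 : k = 0 <;> by_cases hk1 : k + 1 < rest.length <;>
        (simp [hk0, hk1, List.getElem_cons]; try rfl)

theorem AB (tiers : List Int) : get_leader_flags_py tiers = get_leader_flags_py_alt tiers := by
  obtain ⟨hlenA, hgetA⟩ := loopA tiers tiers.length le_rfl
    (tiers.map (fun t => decide (0 < t))) (by simp)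
  apply List.ext_getElem?
  intro j
  show (get_leader_flags_py tiers)[j]? = _
  unfold get_leader_flags_py
  rw [altB_goB tiers, hgetA j]
  by_cases hj : j < tiers.length
  · rw [goB_get tiers false j hj]
    unfold CndA
    simp only [pyGetD_at tiers j hj, decide_eq_true_eq]
    have hposq : (tiers.map (fun t => decide (0 < t)))[j]? = some (decide (0 < tiers[j])) := by
      simp [hj]
    rw [hposq]
    -- rewrite the Int-indexed neighbor reads into Nat-indexed ones
    have hleft : (0 < (j : Int) ∧ 0 < PySem.List.pyGetD tiers ((j : Int) - 1) 0) ↔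
        (¬ j = 0 ∧ 0 < tiers[j-1]'(by omega)) := by
      by_cases hj0 : j = 0
      · subst hj0; simp
      · have hc : (j : Int) - 1 = ((j - 1 : Nat) : Int) := by omega
        rw [hc, pyGetD_at tiers (j-1) (by omega)]
        constructor
        · rintro ⟨_, h⟩; exact ⟨hj0, h⟩
        · rintro ⟨_, h⟩; exact ⟨by omega, h⟩
    have hright : ((j : Int) < (tiers.length : Int) - 1 ∧ 0 < PySem.List.pyGetD tiers ((j : Int) + 1) 0) ↔
        (∃ h1 : j + 1 < tiers.length, 0 < tiers[j+1]'h1) := by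
      by_cases hj1 : j + 1 < tiers.length
      · have hc : (j : Int) + 1 = ((j + 1 : Nat) : Int) := by omega
        rw [hc, pyGetD_at tiers (j+1) hj1]
        constructor
        · rintro ⟨_, h⟩; exact ⟨hj1, h⟩
        · rintro ⟨_, h⟩; exact ⟨by omega, h⟩
      · constructor
        · rintro ⟨h1, _⟩; omega
        · rintro ⟨h1, _⟩; omega
    by_cases hC : tiers[j] = 0 ∧ ((0 < (j : Int) ∧ 0 < PySem.List.pyGetD tiers ((j : Int) - 1) 0) ∨
        ((j : Int) < (tiers.length : Int) - 1 ∧ 0 < PySem.List.pyGetD tiers ((j : Int) + 1) 0))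
    · rw [if_pos ⟨hj, hC⟩]
      obtain ⟨h0, hPQ⟩ := hC
      simp only [h0, decide_true, Bool.true_and]
      congr 1
      have : 0 < tiers[j] ∨ True := Or.inr trivial
      rcases hPQ with hL | hR
      · obtain ⟨hne, hgt⟩ := hleft.mp hL
        simp [dif_neg hne, hgt]
      · obtain ⟨h1, hgt⟩ := hright.mp hR
        simp [dif_pos h1, hgt]
    · rw [if_neg (fun h => hC h.2)]
      congr 1
      by_cases h0 : tiers[j] = 0
      · simp only [h0, decide_true, Bool.true_and, lt_irrefl, decide_false, Bool.false_or]
        symm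
        rw [Bool.or_eq_false_iff]
        constructor
        · by_cases hj0 : j = 0
          · simp [dif_pos hj0]
          · rw [dif_neg hj0]
            simp only [decide_eq_false_iff_not, not_lt]
            by_contra hgt
            exact hC ⟨h0, Or.inl (hleft.mpr ⟨hj0, by omega⟩)⟩
        · by_cases hj1 : j + 1 < tiers.length
          · rw [dif_pos hj1]
            simp only [decide_eq_false_iff_not, not_lt]
            by_contra hgt
            exact hC ⟨h0, Or.inr (hright.mpr ⟨hj1, by omega⟩)⟩
          · rw [dif_neg hj1]
      · simp [h0]
  · rw [if_neg (fun h => hj h.1)]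
    rw [List.getElem?_eq_none (by simp; omega),
      List.getElem?_eq_none (by rw [goB_len tiers false]; omega)]

-- ===== VERDICT (by name: the statement is the Claim_ definition above) =====
theorem get_leader_flags_py_spec : Claim_equal_get_leader_flags_py := by
  intro tiers _
  unfold Spec_get_leader_flags_py
  exact AB tiers
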